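-- pv_equiv track=rewrite | github.com/kevteg/files-cluster | backend/receive.py | getConnectionInfo
-- ===== SOURCE A (Python) =====
-- import binascii
--
-- def getConnectionInfo(group_name):
--     text = (binascii.hexlify(group_name.encode('utf-8')).decode())
--     port = int('0x' + text[1:4], 0)
--     port = port + 5000
--     cafe = 'cafe'
--     ip = "ff05"
--     index = 0
--     lon = len(text)
--     if lon > 29:
--         text = text[0:28]
--
--     for i in range(1, 29 - lon):
--         text += cafe[index]
--         index = 0 if not i%4 else index + 1
--
--     for index, i in enumerate(text, start = 0):
--         ip += i if index%4 else ':' + i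
--
--     return ip, port
-- ===== SOURCE B (Python) =====
-- def getConnectionInfo(group_name):
--     text = group_name.encode('utf-8').hex()
--     port = int('0x' + text[1:4], 0)
--     port = port + 5000
--     lon = len(text)
--     if lon > 29:
--         text = text[0:28]
--     text += ('cafe' * 8)[:max(0, 28 - lon)]
--     ip = 'ff05:' + ':'.join(text[i:i + 4] for i in range(0, len(text), 4))
--     return ip, port
-- ===== Notes on version B (the rewrite author's own statement) =====
-- stated objective: simpler
-- what changed: Replaced the index-tracking padding loop by a closed-form slice of 'cafe'*8 and the character-by-character ip-building loop by chunking the text into 4-char groups joined with ':'.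
import Mathlib
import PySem

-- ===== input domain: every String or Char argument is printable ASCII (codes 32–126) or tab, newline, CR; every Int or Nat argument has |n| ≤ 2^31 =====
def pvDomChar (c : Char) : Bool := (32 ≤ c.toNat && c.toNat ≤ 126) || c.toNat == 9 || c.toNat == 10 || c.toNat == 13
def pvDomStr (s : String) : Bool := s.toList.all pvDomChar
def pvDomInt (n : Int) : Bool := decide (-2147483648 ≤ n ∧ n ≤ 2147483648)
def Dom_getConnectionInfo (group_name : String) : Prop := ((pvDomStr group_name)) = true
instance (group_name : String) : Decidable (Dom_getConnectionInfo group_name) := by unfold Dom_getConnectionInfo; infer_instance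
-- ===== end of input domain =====

-- B replaces A's index-tracking padding loop by a closed-form slice of 'cafe'*8 and A's
-- char-by-char ip loop by a chunk-and-join, for simplicity (no speed claim).

-- ===== PORT A =====
-- shared helper: binascii.hexlify(s.encode('utf-8')).decode(); exact on the ASCII domain
-- (every Dom char is one UTF-8 byte equal to its code), two lowercase hex digits per byte
def hexDigit (n : Nat) : Char := "0123456789abcdef".toList.getD n '0'

def hexlify : List Char → List Char
  | [] => []
  | c :: cs => hexDigit (c.toNat / 16) :: hexDigit (c.toNat % 16) :: hexlify cs

-- helper: int('0x' + t, 0); exact for nonempty lowercase-hex t, which hexlify guarantees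
-- (Python raises ValueError when t is empty, i.e. on group_name = ''; Pre_ excludes that)
def hexVal (c : Char) : Int := if 97 ≤ c.toNat then (c.toNat : Int) - 87 else (c.toNat : Int) - 48

def parseHex (cs : List Char) : Int := cs.foldl (fun acc c => 16 * acc + hexVal c) 0

def getConnectionInfo (group_name : String) : String × Int :=
  let text := hexlify group_name.toList
  let port := parseHex (PySem.List.slice text (some 1) (some 4))
  let port := port + 5000
  let cafe := "cafe".toList
  let ip := "ff05".toList
  let lon : Int := text.length
  let text := if lon > 29 then PySem.List.slice text (some 0) (some 28) else text
  -- for i in range(1, 29 - lon): text += cafe[index]; index = 0 if not i%4 else index+1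
  -- (cafe[index] via pyGetD: index stays in [0,3], so Python never raises here)
  let s := (PySem.List.pyRange 1 (29 - lon) 1).foldl
      (fun (s : List Char × Int) i =>
        (s.1 ++ [PySem.List.pyGetD cafe s.2 ' '], if i % 4 == 0 then 0 else s.2 + 1))
      (text, 0)
  let text := s.1
  -- for index, i in enumerate(text): ip += i if index%4 else ':' + i
  let ip := (PySem.List.enumerate text 0).foldl
      (fun ip (p : Int × Char) => if p.1 % 4 ≠ 0 then ip ++ [p.2] else ip ++ [':', p.2]) ip
  (String.ofList ip, port)

-- ===== PORT B =====
-- 'cafe' * 8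
def cafe8 : List Char := (List.replicate 8 "cafe".toList).flatten

def getConnectionInfo_alt (group_name : String) : String × Int :=
  let text := hexlify group_name.toList
  let port := parseHex (PySem.List.slice text (some 1) (some 4))
  let port := port + 5000
  let lon : Int := text.length
  let text := if lon > 29 then PySem.List.slice text (some 0) (some 28) else text
  let text := text ++ PySem.List.slice cafe8 none (some (max 0 (28 - lon)))
  -- 'ff05:' + ':'.join(text[i:i+4] for i in range(0, len(text), 4))
  let ip := "ff05:".toList ++ PySem.Chars.join [':']
      ((PySem.List.pyRange 0 (text.length : Int) 4).map
        (fun i => PySem.List.slice text (some i) (some (i + 4))))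
  (String.ofList ip, port)

-- ===== PRECONDITION & SPEC =====
-- Python A raises ValueError on the empty string (int('0x', 0)); B does the same, so it is excluded.
def Pre_getConnectionInfo (group_name : String) : Prop := group_name ≠ ""
instance (group_name : String) : Decidable (Pre_getConnectionInfo group_name) := by unfold Pre_getConnectionInfo; infer_instance
def pvWitness_getConnectionInfo : String := "node"

def Spec_getConnectionInfo (group_name : String) (out : String × Int) : Prop := out = getConnectionInfo_alt group_name
instance (group_name : String) (out : String × Int) : Decidable (Spec_getConnectionInfo group_name out) := by unfold Spec_getConnectionInfo; infer_instance

-- ===== CLAIM (what is proved, stated in full; the proofs are below) =====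
def Claim_equal_getConnectionInfo : Prop := ∀ (group_name : String), Dom_getConnectionInfo group_name → Pre_getConnectionInfo group_name → Spec_getConnectionInfo group_name (getConnectionInfo group_name)

-- ===== LEMMAS AND PROOFS =====

theorem hexlify_length (cs : List Char) : (hexlify cs).length = 2 * cs.length := by
  induction cs with
  | nil => simp [hexlify]
  | cons c cs ih => simp [hexlify, ih]; omega

-- A's padding fold appends independently of the text prefix
theorem padFold_prefix (r : List Int) (t : List Char) (idx : Int) :
    ((r.foldl (fun (s : List Char × Int) i =>
        (s.1 ++ [PySem.List.pyGetD "cafe".toList s.2 ' '], if i % 4 == 0 then 0 else s.2 + 1))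
      (t, idx))).1
    = t ++ ((r.foldl (fun (s : List Char × Int) i =>
        (s.1 ++ [PySem.List.pyGetD "cafe".toList s.2 ' '], if i % 4 == 0 then 0 else s.2 + 1))
      (([] : List Char), idx))).1 := by
  induction r generalizing t idx with
  | nil => simp
  | cons i r ih =>
    simp only [List.foldl_cons, List.nil_append]
    rw [ih, ih [PySem.List.pyGetD "cafe".toList idx ' ']]
    simp

-- A's padding (started from an empty accumulator) equals B's closed-form slice of 'cafe'*8
theorem pad_eq (lon : Int) (h0 : 0 ≤ lon) :
    ((PySem.List.pyRange 1 (29 - lon) 1).foldl (fun (s : List Char × Int) i =>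
        (s.1 ++ [PySem.List.pyGetD "cafe".toList s.2 ' '], if i % 4 == 0 then 0 else s.2 + 1))
      (([] : List Char), 0)).1
    = PySem.List.slice cafe8 none (some (max 0 (28 - lon))) := by
  by_cases hbig : 29 ≤ lon
  · have hm : max 0 (28 - lon) = 0 := by omega
    rw [PySem.List.pyRange_one_eq_nil (by omega), hm]
    decide
  · have h28 : lon ≤ 28 := by omega
    interval_cases lon <;> decide

def chunk4 : Nat → List Char → List (List Char)
  | 0, _ => []
  | (k+1), t => t.take 4 :: chunk4 k (t.drop 4)

theorem ipFold_chunks (k : Nat) : ∀ (t acc : List Char) (s : Int), s % 4 = 0 → t.length = 4 * k →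
    (PySem.List.enumerate t s).foldl
      (fun ip (p : Int × Char) => if p.1 % 4 ≠ 0 then ip ++ [p.2] else ip ++ [':', p.2]) acc
    = acc ++ (chunk4 k t).flatMap (fun c => ':' :: c) := by
  induction k with
  | zero =>
    intro t acc s hs hl
    have ht : t = [] := List.eq_nil_of_length_eq_zero (by omega)
    subst ht
    simp [chunk4, PySem.List.enumerate_nil]
  | succ k ih =>
    intro t acc s hs hl
    obtain ⟨a, t, rfl⟩ : ∃ c t', t = c :: t' := by cases t with | nil => simp at hl | cons c t' => exact ⟨c,t',rfl⟩
    simp only [List.length_cons] at hl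
    obtain ⟨b, t, rfl⟩ : ∃ c t', t = c :: t' := by cases t with | nil => exfalso; simp at hl; omega | cons c t' => exact ⟨c,t',rfl⟩
    simp only [List.length_cons] at hl
    obtain ⟨c, t, rfl⟩ : ∃ c t', t = c :: t' := by cases t with | nil => exfalso; simp at hl; omega | cons c t' => exact ⟨c,t',rfl⟩
    simp only [List.length_cons] at hl
    obtain ⟨d, t, rfl⟩ : ∃ c t', t = c :: t' := by cases t with | nil => exfalso; simp at hl; omega | cons c t' => exact ⟨c,t',rfl⟩
    simp only [List.length_cons] at hl
    simp only [PySem.List.enumerate_cons, List.foldl_cons]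
    have h0 : ¬(s % 4 ≠ 0) := by omega
    have h1 : (s + 1) % 4 ≠ 0 := by omega
    have h2 : (s + 1 + 1) % 4 ≠ 0 := by omega
    have h3 : (s + 1 + 1 + 1) % 4 ≠ 0 := by omega
    rw [if_neg h0, if_pos h1, if_pos h2, if_pos h3]
    rw [ih t _ (s + 1 + 1 + 1 + 1) (by omega) (by omega)]
    simp [chunk4]

theorem join_flat (x : List Char) (l : List (List Char)) :
    [':'] ++ PySem.Chars.join [':'] (x :: l) = (x :: l).flatMap (fun c => ':' :: c) := by
  induction l generalizing x with
  | nil => simp [PySem.Chars.join_singleton]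
  | cons y l ih =>
    rw [PySem.Chars.join_cons_cons]
    simp only [List.flatMap_cons]
    rw [← List.flatMap_cons]
    rw [← ih y]
    simp

theorem chunkmap (t : List Char) (h : t.length = 28) :
    (PySem.List.pyRange 0 (t.length : Int) 4).map
      (fun i => PySem.List.slice t (some i) (some (i + 4))) = chunk4 7 t := by
  rw [show ((t.length : Int)) = 28 by rw [h]; norm_num]
  rw [PySem.List.pyRange_of_pos 0 28 (by norm_num)]
  norm_num [List.range_succ, chunk4]
  rw [show Int.toNat 7 = 7 from rfl]
  simp only [List.range_succ, List.range_zero, List.map_append, List.map_cons, List.map_nil, Function.comp]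
  norm_num
  refine ⟨?_, ?_, ?_, ?_, ?_, ?_, ?_⟩
  · rw [PySem.List.slice_to t (by norm_num)]; rfl
  all_goals rw [PySem.List.slice_toNat t (by norm_num) (by norm_num)]
  all_goals rfl

-- the ip built by A's enumerate loop equals B's chunk-and-join, for the 28-char text both reach
theorem ip_eq (t : List Char) (h : t.length = 28) :
    (PySem.List.enumerate t 0).foldl
      (fun ip (p : Int × Char) => if p.1 % 4 ≠ 0 then ip ++ [p.2] else ip ++ [':', p.2]) "ff05".toList
    = "ff05:".toList ++ PySem.Chars.join [':']
        ((PySem.List.pyRange 0 (t.length : Int) 4).map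
          (fun i => PySem.List.slice t (some i) (some (i + 4)))) := by
  rw [ipFold_chunks 7 t "ff05".toList 0 (by norm_num) (by omega), chunkmap t h,
    show ("ff05:".toList) = "ff05".toList ++ [':'] from rfl, List.append_assoc,
    show chunk4 7 t = t.take 4 :: chunk4 6 (t.drop 4) from rfl, join_flat]

-- the processed text has exactly 28 characters whenever group_name is nonempty
theorem textF_length (t0 : List Char) (n : Nat) (hl : t0.length = 2 * n) (hn : 1 ≤ n) :
    (((if (t0.length : Int) > 29 then PySem.List.slice t0 (some 0) (some 28) else t0) ++
      PySem.List.slice cafe8 none (some (max 0 (28 - (t0.length : Int))))).length) = 28 := by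
  have hc : cafe8.length = 32 := by decide
  rw [PySem.List.slice_to cafe8 (le_max_left 0 _)]
  by_cases hbig : (t0.length : Int) > 29
  · rw [if_pos hbig]
    have : PySem.List.slice t0 (some 0) (some 28) = t0.take 28 := by
      rw [show ((0:Int)) = ((0:Nat):Int) by rfl, show ((28:Int)) = ((28:Nat):Int) by rfl,
        PySem.List.slice_natCast]
      simp
    rw [this]
    simp [List.length_take, List.length_append]
    omega
  · rw [if_neg hbig]
    simp [List.length_append]
    omega

-- ===== VERDICT (by name: the statement is the Claim_ definition above) =====
theorem getConnectionInfo_spec : Claim_equal_getConnectionInfo := by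
  intro g _hdom hpre
  unfold Spec_getConnectionInfo getConnectionInfo getConnectionInfo_alt
  have hne : g.toList ≠ [] := by
    intro h
    exact hpre (by simpa [String.toList_eq_nil_iff] using h)
  generalize hgen : hexlify g.toList = t0
  obtain ⟨n, hn, hl⟩ : ∃ n : Nat, 1 ≤ n ∧ t0.length = 2 * n := by
    refine ⟨g.toList.length, ?_, by rw [← hgen, hexlify_length]⟩
    exact List.length_pos_of_ne_nil hne
  simp only [Prod.mk.injEq]
  refine ⟨?_, trivial⟩
  rw [padFold_prefix, pad_eq _ (by positivity)]
  exact congrArg String.ofList (ip_eq _ (textF_length t0 n hl hn))
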